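-- pv_equiv track=rewrite | github.com/MyaGya/Python_Practice | Programers_backup/영어 끝말잇기.py | solution
-- ===== SOURCE A (Python) =====
-- def solution(n, words):
--     history = {words[0]:True}
--     for i in range(1,len(words)):
--         if (words[i][0] != words[i-1][-1]) or words[i] in history:
--             return [i%n+1,i//n+1]
--         else:
--             history[words[i]] = True
--     else:
--         return [0,0]
-- ===== SOURCE B (Python) =====
-- def solution(n, words):
--     seen = {words[0]}
--     dup = None
--     for i in range(1, len(words)):
--         if words[i] in seen:
--             dup = i
--             break
--         seen.add(words[i])
--     limit = dup if dup is not None else len(words)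
--     mis = None
--     for i in range(1, limit):
--         if words[i][0] != words[i - 1][-1]:
--             mis = i
--             break
--     fail = mis if mis is not None else dup
--     if fail is None:
--         return [0, 0]
--     return [fail % n + 1, fail // n + 1]
-- ===== Notes on version B (the rewrite author's own statement) =====
-- stated objective: alternative
-- what changed: A's single early-return loop carrying a history dict is replaced by two separate first-failure scans (first repeated word using a growing seen set; first first/last-letter mismatch, scanned only up to the repeat index) whose results are combined afterwards.
import Mathlib
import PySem

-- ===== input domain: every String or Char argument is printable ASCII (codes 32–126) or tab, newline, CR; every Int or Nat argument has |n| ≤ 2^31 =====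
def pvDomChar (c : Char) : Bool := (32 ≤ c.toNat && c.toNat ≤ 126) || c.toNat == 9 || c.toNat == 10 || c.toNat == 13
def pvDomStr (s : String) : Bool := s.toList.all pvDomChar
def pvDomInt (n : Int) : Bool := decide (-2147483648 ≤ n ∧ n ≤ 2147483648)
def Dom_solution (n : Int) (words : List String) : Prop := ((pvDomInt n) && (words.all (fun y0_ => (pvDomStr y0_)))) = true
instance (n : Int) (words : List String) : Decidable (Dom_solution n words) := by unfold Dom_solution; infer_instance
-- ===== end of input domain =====

-- B replaces A's single early-return loop carrying a history dict by two separate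
-- first-failure scans (first repeated word; first letter mismatch, scanned only up to
-- the repeat) combined afterwards (objective: alternative decomposition).

-- ===== PORT A =====
-- the 'for i in range(1, len(words))' loop with its early return, carrying the history dict
def solutionLoop (n : Int) (words : List String) (history : PySem.Dict String Bool) :
    List Int → List Int
  | [] => [0, 0]
  | i :: rest =>
    let wi := (PySem.List.pyGet? words i).getD ""
    let wprev := (PySem.List.pyGet? words (i - 1)).getD ""
    if PySem.Str.pyGet? wi 0 ≠ PySem.Str.pyGet? wprev (-1) ∨ history.contains wi then
      [PySem.Int.mod i n + 1, PySem.Int.floordiv i n + 1]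
    else
      solutionLoop n words (history.insert wi true) rest

def solution (n : Int) (words : List String) : List Int :=
  let w0 := (PySem.List.pyGet? words 0).getD ""
  solutionLoop n words (PySem.Dict.ofList [(w0, true)])
    (PySem.List.pyRange 1 (PySem.List.len words) 1)

-- ===== PORT B =====
-- pass 1: first index whose word was already seen (maintaining the seen set)
def dupScan (words : List String) (seen : PySem.Set String) : List Int → Option Int
  | [] => none
  | i :: rest =>
    let wi := (PySem.List.pyGet? words i).getD ""
    if seen.contains wi then some i
    else dupScan words (seen.add wi) rest

-- pass 2: first index (below the limit) whose first letter differs from the previous word's last letter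
def misScan (words : List String) : List Int → Option Int
  | [] => none
  | i :: rest =>
    let wi := (PySem.List.pyGet? words i).getD ""
    let wprev := (PySem.List.pyGet? words (i - 1)).getD ""
    if PySem.Str.pyGet? wi 0 ≠ PySem.Str.pyGet? wprev (-1) then some i
    else misScan words rest

def solution_alt (n : Int) (words : List String) : List Int :=
  let w0 := (PySem.List.pyGet? words 0).getD ""
  let dup := dupScan words (PySem.Set.ofList [w0]) (PySem.List.pyRange 1 (PySem.List.len words) 1)
  let lim := match dup with | some d => d | none => PySem.List.len words
  let mis := misScan words (PySem.List.pyRange 1 lim 1)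
  let fail := match mis with | some m => some m | none => dup
  match fail with
  | none => [0, 0]
  | some i => [PySem.Int.mod i n + 1, PySem.Int.floordiv i n + 1]

-- ===== PRECONDITION & SPEC =====
-- Pre_ admits exactly the inputs on which A returns: it excludes only inputs where A raises —
-- the empty list (IndexError on words[0]); inputs where A reads an empty word's first or last
-- letter before any failing turn (IndexError); and n = 0 when a failing turn exists
-- (ZeroDivisionError).
def Pre_solution (n : Int) (words : List String) : Prop :=
  words ≠ [] ∧
  (if "" ∈ words then
      words.length = 1 ∨
        ((¬ (words.takeWhile (· ≠ "")).Nodup ∨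
          ¬ List.IsChain (fun a b => b.toList.head? = a.toList.getLast?) (words.takeWhile (· ≠ ""))) ∧
         n ≠ 0)
    else
      (¬ words.Nodup ∨ ¬ List.IsChain (fun a b => b.toList.head? = a.toList.getLast?) words) → n ≠ 0)
instance (n : Int) (words : List String) : Decidable (Pre_solution n words) := by
  unfold Pre_solution; infer_instance

def pvWitness_solution : Int × List String := (3, ["tank", "kick", "know", "wheel"])

def Spec_solution (n : Int) (words : List String) (out : List Int) : Prop := out = solution_alt n words
instance (n : Int) (words : List String) (out : List Int) : Decidable (Spec_solution n words out) := by unfold Spec_solution; infer_instance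

-- ===== CLAIM (what is proved, stated in full; the proofs are below) =====
def Claim_equal_solution : Prop := ∀ (n : Int) (words : List String), Dom_solution n words → Pre_solution n words → Spec_solution n words (solution n words)

-- ===== LEMMAS AND PROOFS =====

lemma dupScan_mem (words : List String) :
    ∀ (l : List Int) (seen : PySem.Set String) (d : Int),
      dupScan words seen l = some d → d ∈ l := by
  intro l
  induction l with
  | nil => intro seen d h; simp [dupScan] at h
  | cons i rest ih =>
    intro seen d h
    simp only [dupScan] at h
    split at h
    · simp at h; simp [h]
    · exact List.mem_cons_of_mem _ (ih _ _ h)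

lemma contains_add_eq (seen : PySem.Set String) (x w : String) :
    (PySem.Set.add seen x).contains w = (w == x || seen.contains w) := by
  rw [PySem.Set.add_eq_ite]
  by_cases hx : x ∈ seen
  · rw [if_pos hx]
    by_cases hw : w = x
    · subst hw; simp [hx]
    · simp [hw]
  · rw [if_neg hx]
    by_cases hw : w = x
    · subst hw; simp [hx]
    · simp [hw]

-- the central invariant: A's combined loop equals B's two scans (the mismatch scan cut
-- off below the duplicate index) joined afterwards, given that the history dict and the
-- seen set have the same members and the remaining indices are strictly increasing
lemma loop_eq_scans (n : Int) (words : List String) :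
    ∀ (l : List Int), l.Pairwise (· < ·) →
    ∀ (hist : PySem.Dict String Bool) (seen : PySem.Set String),
      (∀ w, hist.contains w = seen.contains w) →
      solutionLoop n words hist l =
        (match (match misScan words (match dupScan words seen l with
                                     | some d => l.takeWhile (fun x => decide (x < d))
                                     | none => l) with
                | some m => some m
                | none => dupScan words seen l) with
         | none => [0, 0]
         | some i => [PySem.Int.mod i n + 1, PySem.Int.floordiv i n + 1]) := by
  intro l
  induction l with
  | nil => intro _ hist seen _; simp [solutionLoop, dupScan, misScan]
  | cons i rest ih =>
    intro hpw hist seen hmem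
    have hlt : ∀ x ∈ rest, i < x := (List.pairwise_cons.1 hpw).1
    have hpw' : rest.Pairwise (· < ·) := (List.pairwise_cons.1 hpw).2
    simp only [solutionLoop, dupScan]
    set wi := (PySem.List.pyGet? words i).getD "" with hwi
    set wprev := (PySem.List.pyGet? words (i - 1)).getD "" with hwprev
    by_cases hdup : wi ∈ seen
    · -- duplicate at i: A returns at i; dupScan stops at i and the bounded
      -- mismatch scan sees no indices at all
      simp [hdup, hmem wi, misScan, List.takeWhile]
    · by_cases hmis : PySem.List.pyGet? wi.toList 0 = PySem.List.pyGet? wprev.toList (-1)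
      · -- no failure at i: both sides recurse with the updated history / seen set
        rw [if_neg (by simp [PySem.Str.pyGet?, hmis, hmem wi, hdup])]
        rw [ih hpw' (hist.insert wi true) (seen.add wi) (by
          intro w
          rw [PySem.Dict.contains_insert, contains_add_eq, hmem w])]
        cases hds : dupScan words (seen.add wi) rest with
        | none => simp [hdup, misScan, PySem.Str.pyGet?, hmis, ← hwi, ← hwprev]
        | some d =>
          have hid : i < d := hlt d (dupScan_mem words rest (seen.add wi) d hds)
          simp [hdup, misScan, PySem.Str.pyGet?, hmis, List.takeWhile, hid, ← hwi, ← hwprev]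
      · -- mismatch at i: A returns at i, and so does the bounded mismatch scan
        rw [if_pos (Or.inl (by simp [PySem.Str.pyGet?, hmis]))]
        cases hds : dupScan words (seen.add wi) rest with
        | none => simp [hdup, misScan, PySem.Str.pyGet?, hmis, ← hwi, ← hwprev]
        | some d =>
          have hid : i < d := hlt d (dupScan_mem words rest (seen.add wi) d hds)
          simp [hdup, misScan, PySem.Str.pyGet?, hmis, List.takeWhile, hid, ← hwi, ← hwprev]

-- the bounded range B actually scans is the takeWhile the invariant talks about
lemma takeWhile_lt_pyRange (a b d : Int) (had : a ≤ d) (hdb : d ≤ b) :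
    (PySem.List.pyRange a b 1).takeWhile (fun x => decide (x < d)) = PySem.List.pyRange a d 1 := by
  rw [PySem.List.pyRange_one_append a d b had hdb, List.takeWhile_append]
  have h1 : ∀ x ∈ PySem.List.pyRange a d 1, decide (x < d) = true := by
    intro x hx
    have := (PySem.List.mem_pyRange_one).1 hx
    simp [this.2]
  rw [List.takeWhile_eq_self_iff.2 h1, if_pos rfl]
  by_cases hlt : d < b
  · rw [PySem.List.pyRange_one_cons hlt]
    simp
  · rw [PySem.List.pyRange_one_eq_nil (show b ≤ d by omega)]
    simp

-- ===== VERDICT (by name: the statement is the Claim_ definition above) =====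
theorem solution_spec : Claim_equal_solution := by
  intro n words _ _
  unfold Spec_solution solution solution_alt
  have hmem : ∀ w, (PySem.Dict.ofList [((PySem.List.pyGet? words 0).getD "", true)]).contains w
      = (PySem.Set.ofList [(PySem.List.pyGet? words 0).getD ""]).contains w := by
    intro w
    simp [PySem.Dict.ofList, PySem.Dict.update, PySem.Dict.contains_insert,
      PySem.Dict.contains_empty, PySem.Set.ofList, PySem.Set.add, PySem.Set.contains,
      Bool.beq_eq_decide_eq]
  rw [loop_eq_scans n words _ (PySem.List.pairwise_lt_pyRange_one 1 (PySem.List.len words)) _ _ hmem]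
  cases hds : dupScan words (PySem.Set.ofList [(PySem.List.pyGet? words 0).getD ""])
      (PySem.List.pyRange 1 (PySem.List.len words) 1) with
  | none => simp only [hds]
  | some d =>
    have hd := (PySem.List.mem_pyRange_one).1 (dupScan_mem words _ _ d hds)
    simp only [hds, takeWhile_lt_pyRange 1 (PySem.List.len words) d hd.1 (le_of_lt hd.2)]
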